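-- pv_equiv track=rewrite | github.com/dombroks/Daily-Coding-Problems | Google_Problems/Google_Problem_22.py | _are_in_the_same_diagonal
-- ===== SOURCE A (Python) =====
-- def _are_in_the_same_diagonal(matrix_length, pair1, pair2):
--     if pair1 == pair2:
--         return False
--     diagonal = []
--     second_diagonal = []
--     for i in range(matrix_length):
--         for j in range(matrix_length):
--             if i == j:
--                 diagonal.append((i, j))
--             if i + j == matrix_length - 1:
--                 second_diagonal.append((i, j))
--
--     if pair1 in diagonal and pair2 in diagonal:
--         return True
--     if pair1 in second_diagonal and pair2 in second_diagonal:
--         return True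
--
--     return False
-- ===== SOURCE B (Python) =====
-- def _are_in_the_same_diagonal(matrix_length, pair1, pair2):
--     if pair1 == pair2:
--         return False
--
--     def on_main(p):
--         i, j = p
--         return 0 <= i < matrix_length and i == j
--
--     def on_anti(p):
--         i, j = p
--         return 0 <= i < matrix_length and 0 <= j < matrix_length and i + j == matrix_length - 1
--
--     return (on_main(pair1) and on_main(pair2)) or (on_anti(pair1) and on_anti(pair2))
-- ===== Notes on version B (the rewrite author's own statement) =====
-- stated objective: faster
-- what changed: Replaced the O(n^2) construction of both diagonal coordinate lists followed by list membership tests with a direct O(1) arithmetic test (i==j on the main diagonal, i+j==n-1 with both coordinates in range on the anti-diagonal).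
import Mathlib
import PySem

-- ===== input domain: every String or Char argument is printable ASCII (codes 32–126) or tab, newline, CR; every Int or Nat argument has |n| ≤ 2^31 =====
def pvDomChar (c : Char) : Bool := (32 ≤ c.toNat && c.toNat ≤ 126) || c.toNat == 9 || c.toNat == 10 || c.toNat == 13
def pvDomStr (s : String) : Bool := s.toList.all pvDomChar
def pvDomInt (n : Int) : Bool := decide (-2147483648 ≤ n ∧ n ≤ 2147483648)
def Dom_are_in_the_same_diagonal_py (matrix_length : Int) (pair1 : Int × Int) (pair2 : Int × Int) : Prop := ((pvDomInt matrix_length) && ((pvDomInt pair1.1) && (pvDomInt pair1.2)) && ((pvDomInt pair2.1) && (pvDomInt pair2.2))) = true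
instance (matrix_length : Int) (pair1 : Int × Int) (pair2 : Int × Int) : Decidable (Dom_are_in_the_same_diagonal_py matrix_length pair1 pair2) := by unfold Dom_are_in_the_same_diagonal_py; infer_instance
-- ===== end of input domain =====

-- B replaces A's O(n^2) construction of both diagonal lists by a direct O(1) arithmetic test (objective: faster).

-- ===== PORT A =====
-- the two lists A builds with the nested loops (diagonal, second_diagonal)
def pvBuildDiags (n : Int) : List (Int × Int) × List (Int × Int) :=
  (PySem.List.pyRange 0 n 1).foldl (fun st i =>
    (PySem.List.pyRange 0 n 1).foldl (fun st j =>
      let st := if i == j then (st.1 ++ [(i, j)], st.2) else st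
      if i + j == n - 1 then (st.1, st.2 ++ [(i, j)]) else st) st) ([], [])

def are_in_the_same_diagonal_py (matrix_length : Int) (pair1 : Int × Int) (pair2 : Int × Int) : Bool :=
  if pair1 == pair2 then false
  else
    let st := pvBuildDiags matrix_length
    if st.1.contains pair1 && st.1.contains pair2 then true
    else if st.2.contains pair1 && st.2.contains pair2 then true
    else false

-- ===== PORT B =====
def pvOnMain (n : Int) (p : Int × Int) : Bool :=
  decide (0 ≤ p.1) && decide (p.1 < n) && (p.1 == p.2)

def pvOnAnti (n : Int) (p : Int × Int) : Bool :=
  decide (0 ≤ p.1) && decide (p.1 < n) && decide (0 ≤ p.2) && decide (p.2 < n) && (p.1 + p.2 == n - 1)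

def are_in_the_same_diagonal_py_alt (matrix_length : Int) (pair1 : Int × Int) (pair2 : Int × Int) : Bool :=
  if pair1 == pair2 then false
  else (pvOnMain matrix_length pair1 && pvOnMain matrix_length pair2)
    || (pvOnAnti matrix_length pair1 && pvOnAnti matrix_length pair2)

-- ===== PRECONDITION & SPEC =====
def Spec_are_in_the_same_diagonal_py (matrix_length : Int) (pair1 : Int × Int) (pair2 : Int × Int) (out : Bool) : Prop := out = are_in_the_same_diagonal_py_alt matrix_length pair1 pair2
instance (matrix_length : Int) (pair1 : Int × Int) (pair2 : Int × Int) (out : Bool) : Decidable (Spec_are_in_the_same_diagonal_py matrix_length pair1 pair2 out) := by unfold Spec_are_in_the_same_diagonal_py; infer_instance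

-- ===== CLAIM (what is proved, stated in full; the proofs are below) =====
def Claim_equal_are_in_the_same_diagonal_py : Prop := ∀ (matrix_length : Int) (pair1 : Int × Int) (pair2 : Int × Int), Dom_are_in_the_same_diagonal_py matrix_length pair1 pair2 → Spec_are_in_the_same_diagonal_py matrix_length pair1 pair2 (are_in_the_same_diagonal_py matrix_length pair1 pair2)

-- ===== LEMMAS AND PROOFS =====

-- the filter over one full row that A's inner loop performs picks out exactly one cell
theorem pv_filter_eq_self {n i : Int} (h0 : 0 ≤ i) (h1 : i < n) :
    (PySem.List.pyRange 0 n 1).filter (fun j => i == j) = [i] := by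
  have hc : (fun j : Int => i == j) = (fun j : Int => j == i) := by
    funext j
    by_cases h : i = j
    · simp [h]
    · simp [h, Ne.symm h]
  rw [hc, List.filter_beq]
  have hm : i ∈ PySem.List.pyRange 0 n 1 := by
    rw [PySem.List.mem_pyRange_one]; exact ⟨h0, h1⟩
  rw [List.count_eq_one_of_mem (PySem.List.nodup_pyRange_one 0 n) hm]
  simp

theorem pv_filter_anti {n i : Int} (h0 : 0 ≤ i) (h1 : i < n) :
    (PySem.List.pyRange 0 n 1).filter (fun j => i + j == n - 1) = [n - 1 - i] := by
  have hc : (fun j : Int => i + j == n - 1) = (fun j : Int => j == n - 1 - i) := by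
    funext j
    by_cases h : i + j = n - 1 <;> simp [h] <;> omega
  rw [hc, List.filter_beq]
  have hm : n - 1 - i ∈ PySem.List.pyRange 0 n 1 := by
    rw [PySem.List.mem_pyRange_one]; omega
  rw [List.count_eq_one_of_mem (PySem.List.nodup_pyRange_one 0 n) hm]
  simp

-- one pass of A's inner loop, for a row index i that is in range
theorem pv_inner_eq {n i : Int} (h0 : 0 ≤ i) (h1 : i < n)
    (st : List (Int × Int) × List (Int × Int)) :
    (PySem.List.pyRange 0 n 1).foldl (fun st j =>
      let st := if i == j then (st.1 ++ [(i, j)], st.2) else st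
      if i + j == n - 1 then (st.1, st.2 ++ [(i, j)]) else st) st
    = (st.1 ++ [(i, i)], st.2 ++ [(i, n - 1 - i)]) := by
  obtain ⟨s1, s2⟩ := st
  have hstep : (fun (st : List (Int × Int) × List (Int × Int)) (j : Int) =>
      let st := if i == j then (st.1 ++ [(i, j)], st.2) else st
      if i + j == n - 1 then (st.1, st.2 ++ [(i, j)]) else st)
    = (fun st j => (if i == j then st.1 ++ [(i, j)] else st.1,
                    if i + j == n - 1 then st.2 ++ [(i, j)] else st.2)) := by
    funext st j
    by_cases ha : i == j <;> by_cases hb : i + j == n - 1 <;> simp [ha, hb]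
  rw [hstep,
      PySem.List.foldl_prod_mk (f := fun (a : List (Int × Int)) (j : Int) => if i == j then a ++ [(i, j)] else a)
        (g := fun (a : List (Int × Int)) (j : Int) => if i + j == n - 1 then a ++ [(i, j)] else a),
      PySem.List.foldl_append_if (p := fun j => i == j) (f := fun j => (i, j)),
      PySem.List.foldl_append_if (p := fun j => i + j == n - 1) (f := fun j => (i, j)),
      pv_filter_eq_self h0 h1, pv_filter_anti h0 h1]
  simp

-- A's whole double loop, generalized over any sublist of row indices
theorem pv_outer_eq (n : Int) (l : List Int) (hl : ∀ i ∈ l, 0 ≤ i ∧ i < n)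
    (st : List (Int × Int) × List (Int × Int)) :
    l.foldl (fun st i =>
      (PySem.List.pyRange 0 n 1).foldl (fun st j =>
        let st := if i == j then (st.1 ++ [(i, j)], st.2) else st
        if i + j == n - 1 then (st.1, st.2 ++ [(i, j)]) else st) st) st
    = (st.1 ++ l.map (fun i => (i, i)), st.2 ++ l.map (fun i => (i, n - 1 - i))) := by
  induction l generalizing st with
  | nil => simp
  | cons a t ih =>
    have ha := hl a (by simp)
    simp only [List.foldl_cons, pv_inner_eq ha.1 ha.2]
    rw [ih (fun i hi => hl i (by simp [hi]))]
    simp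

theorem pv_build_eq (n : Int) :
    pvBuildDiags n = ((PySem.List.pyRange 0 n 1).map (fun i => (i, i)),
                      (PySem.List.pyRange 0 n 1).map (fun i => (i, n - 1 - i))) := by
  unfold pvBuildDiags
  rw [pv_outer_eq n _ (fun i hi => by
    rw [PySem.List.mem_pyRange_one] at hi; exact hi)]
  simp

theorem pv_contains_main (n : Int) (p : Int × Int) :
    ((PySem.List.pyRange 0 n 1).map (fun i => (i, i))).contains p = pvOnMain n p := by
  rcases p with ⟨x, y⟩
  rw [Bool.eq_iff_iff]
  simp only [List.contains_eq_mem, pvOnMain, List.mem_map, PySem.List.mem_pyRange_one,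
    Prod.mk.injEq, decide_eq_true_eq, Bool.and_eq_true, beq_iff_eq]
  constructor
  · rintro ⟨i, ⟨ha, hb⟩, rfl, rfl⟩; exact ⟨⟨ha, hb⟩, rfl⟩
  · rintro ⟨⟨ha, hb⟩, rfl⟩; exact ⟨x, ⟨ha, hb⟩, rfl, rfl⟩

theorem pv_contains_anti (n : Int) (p : Int × Int) :
    ((PySem.List.pyRange 0 n 1).map (fun i => (i, n - 1 - i))).contains p = pvOnAnti n p := by
  rcases p with ⟨x, y⟩
  rw [Bool.eq_iff_iff]
  simp only [List.contains_eq_mem, pvOnAnti, List.mem_map, PySem.List.mem_pyRange_one,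
    Prod.mk.injEq, decide_eq_true_eq, Bool.and_eq_true, beq_iff_eq]
  constructor
  · rintro ⟨i, ⟨ha, hb⟩, rfl, rfl⟩
    refine ⟨⟨⟨⟨ha, hb⟩, by omega⟩, by omega⟩, by omega⟩
  · rintro ⟨⟨⟨⟨ha, hb⟩, hc⟩, hd⟩, he⟩
    exact ⟨x, ⟨ha, hb⟩, rfl, by omega⟩

-- ===== VERDICT (by name: the statement is the Claim_ definition above) =====
theorem are_in_the_same_diagonal_py_spec : Claim_equal_are_in_the_same_diagonal_py := by
  intro n p1 p2 _
  unfold Spec_are_in_the_same_diagonal_py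
  unfold are_in_the_same_diagonal_py are_in_the_same_diagonal_py_alt
  by_cases h : p1 == p2
  · simp [h]
  · simp only [h, Bool.false_eq_true, if_false, pv_build_eq,
      pv_contains_main, pv_contains_anti]
    by_cases h1 : pvOnMain n p1 && pvOnMain n p2 <;>
      by_cases h2 : pvOnAnti n p1 && pvOnAnti n p2 <;> simp [h1, h2]
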